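-- pv_equiv track=rewrite | github.com/minidomo/anki-type-test | __init__.py | generate_html_word
-- ===== SOURCE A (Python) =====
-- def generate_html_word(correct: str, user: str) -> str:
--     def determine_color(target: str, value: str):
--         # not typed #7F848E
--         # extra #A2575F
--         # correct #98C379
--         # wrong #E06C75
--
--         if len(target) == 0:
--             return "#A2575F"
--
--         if len(value) == 0:
--             return "#7F848E"
--
--         if target == value:
--             return "#98C379"
--
--         return "#E06C75"
--
--     def create_span(character: str, color: str):
--         return f'<span style="font-size: 14px; color: {color};">{character}</span>'
--
--     ret: list[str] = []
--
--     i = 0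
--     j = 0
--
--     while i < len(correct) and j < len(user):
--         ret.append(create_span(correct[i], determine_color(correct[i], user[j])))
--         i += 1
--         j += 1
--
--     while i < len(correct):
--         ret.append(create_span(correct[i], determine_color(correct[i], "")))
--         i += 1
--
--     while j < len(user):
--         ret.append(create_span(user[j], determine_color("", user[j])))
--         j += 1
--
--     return "".join(ret)
-- ===== SOURCE B (Python) =====
-- def generate_html_word(correct: str, user: str) -> str:
--     n = max(len(correct), len(user))
--     pairs = zip(list(correct) + [""] * (n - len(correct)),
--                 list(user) + [""] * (n - len(user)))
--     return "".join(
--         '<span style="font-size: 14px; color: {};">{}</span>'.format(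
--             "#A2575F" if not c else
--             "#7F848E" if not u else
--             "#98C379" if c == u else "#E06C75",
--             c or u)
--         for c, u in pairs)
-- ===== Notes on version B (the rewrite author's own statement) =====
-- stated objective: idiomatic
-- what changed: A's three sequential index-driven while loops are replaced by padding both strings with empty fill to equal length, zipping, and mapping a single inline span expression (conditional-expression color chain, 'c or u' display) over the pairs.
import Mathlib
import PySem

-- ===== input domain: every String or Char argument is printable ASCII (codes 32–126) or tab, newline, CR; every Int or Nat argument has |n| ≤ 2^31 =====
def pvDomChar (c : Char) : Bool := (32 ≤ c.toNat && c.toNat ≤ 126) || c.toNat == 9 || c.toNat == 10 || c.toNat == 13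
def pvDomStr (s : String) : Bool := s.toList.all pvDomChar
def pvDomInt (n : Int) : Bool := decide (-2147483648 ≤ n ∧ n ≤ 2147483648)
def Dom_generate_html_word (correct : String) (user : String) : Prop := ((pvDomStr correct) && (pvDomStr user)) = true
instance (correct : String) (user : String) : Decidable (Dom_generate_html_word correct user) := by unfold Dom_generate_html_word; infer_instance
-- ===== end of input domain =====

-- B replaces A's three index-driven while loops by padding both strings to equal length,
-- zipping, and mapping one inline span builder over the pairs (idiomatic, same O(n) cost).


-- ===== PORT A =====
-- determine_color: the early-return chain, on the char lists of the one-char (or empty) strings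
def pvColorA (target : List Char) (value : List Char) : String :=
  if target.length = 0 then "#A2575F"
  else if value.length = 0 then "#7F848E"
  else if target = value then "#98C379"
  else "#E06C75"

-- create_span: the f-string, as a char list
def pvSpanA (character : List Char) (color : String) : List Char :=
  "<span style=\"font-size: 14px; color: ".toList ++ color.toList ++ ";\">".toList
    ++ character ++ "</span>".toList

-- third while loop: j walks the rest of user
def pvLoop3A (us : List Char) (ret : List (List Char)) : List (List Char) :=
  match us with
  | [] => ret
  | u :: us' => pvLoop3A us' (ret ++ [pvSpanA [u] (pvColorA [] [u])])

-- second while loop: i walks the rest of correct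
def pvLoop2A (cs : List Char) (ret : List (List Char)) : List (List Char) :=
  match cs with
  | [] => ret
  | c :: cs' => pvLoop2A cs' (ret ++ [pvSpanA [c] (pvColorA [c] [])])

-- first while loop: i and j advance together while both are in range, then loops 2 and 3 run
def pvLoop1A (cs : List Char) (us : List Char) (ret : List (List Char)) : List (List Char) :=
  match cs, us with
  | c :: cs', u :: us' => pvLoop1A cs' us' (ret ++ [pvSpanA [c] (pvColorA [c] [u])])
  | cs, us => pvLoop3A us (pvLoop2A cs ret)

def generate_html_word (correct : String) (user : String) : String :=
  String.ofList (pvLoop1A correct.toList user.toList []).flatten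

-- ===== PORT B =====
-- the inline span expression of B's comprehension, on one padded pair
def pvSpanB (p : List Char × List Char) : List Char :=
  "<span style=\"font-size: 14px; color: ".toList
    ++ (if p.1 = [] then "#A2575F".toList
        else if p.2 = [] then "#7F848E".toList
        else if p.1 = p.2 then "#98C379".toList
        else "#E06C75".toList)
    ++ ";\">".toList
    ++ (if p.1 = [] then p.2 else p.1)   -- c or u
    ++ "</span>".toList

-- list(s) + [""] * (n - len(s)): one-char strings padded with empties
def pvPadB (xs : List Char) (n : Nat) : List (List Char) :=
  xs.map (fun c => [c]) ++ List.replicate (n - xs.length) []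

def generate_html_word_alt (correct : String) (user : String) : String :=
  let cs := correct.toList
  let us := user.toList
  let n := max cs.length us.length
  String.ofList (((pvPadB cs n).zip (pvPadB us n)).map pvSpanB).flatten

-- ===== PRECONDITION & SPEC =====
def Spec_generate_html_word (correct : String) (user : String) (out : String) : Prop := out = generate_html_word_alt correct user
instance (correct : String) (user : String) (out : String) : Decidable (Spec_generate_html_word correct user out) := by unfold Spec_generate_html_word; infer_instance

-- ===== CLAIM (what is proved, stated in full; the proofs are below) =====
def Claim_equal_generate_html_word : Prop := ∀ (correct : String) (user : String), Dom_generate_html_word correct user → Spec_generate_html_word correct user (generate_html_word correct user)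

-- ===== LEMMAS AND PROOFS =====

lemma pvSpanB_none (u : Char) : pvSpanB ([], [u]) = pvSpanA [u] (pvColorA [] [u]) := by
  simp [pvSpanB, pvSpanA, pvColorA]

lemma pvSpanB_left (c : Char) : pvSpanB ([c], []) = pvSpanA [c] (pvColorA [c] []) := by
  simp [pvSpanB, pvSpanA, pvColorA]

lemma pvSpanB_both (c u : Char) : pvSpanB ([c], [u]) = pvSpanA [c] (pvColorA [c] [u]) := by
  by_cases h : c = u <;> simp [pvSpanB, pvSpanA, pvColorA, h]

lemma pvLoop3A_eq (us : List Char) : ∀ ret,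
    pvLoop3A us ret = ret ++ ((List.replicate us.length ([] : List Char)).zip (us.map (fun c => [c]))).map pvSpanB := by
  induction us with
  | nil => simp [pvLoop3A]
  | cons u us ih =>
    intro ret
    simp [pvLoop3A, ih, List.replicate_succ, pvSpanB_none]

lemma pvLoop2A_eq (cs : List Char) : ∀ ret,
    pvLoop2A cs ret = ret ++ ((cs.map (fun c => [c])).zip (List.replicate cs.length ([] : List Char))).map pvSpanB := by
  induction cs with
  | nil => simp [pvLoop2A]
  | cons c cs ih =>
    intro ret
    simp [pvLoop2A, ih, List.replicate_succ, pvSpanB_left]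

lemma pvLoop1A_eq (cs : List Char) : ∀ us ret,
    pvLoop1A cs us ret
      = ret ++ ((pvPadB cs (max cs.length us.length)).zip (pvPadB us (max cs.length us.length))).map pvSpanB := by
  induction cs with
  | nil =>
    intro us ret
    simp [pvLoop1A, pvLoop2A, pvPadB, pvLoop3A_eq]
  | cons c cs ih =>
    intro us ret
    cases us with
    | nil =>
      simp [pvLoop1A, pvLoop3A, pvPadB, pvLoop2A_eq]
    | cons u us =>
      have hmax : max (cs.length + 1) (us.length + 1) = max cs.length us.length + 1 := by omega
      simp [pvLoop1A, ih, pvPadB, hmax, Nat.succ_sub_succ, pvSpanB_both]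

-- ===== VERDICT (by name: the statement is the Claim_ definition above) =====
theorem generate_html_word_spec : Claim_equal_generate_html_word := by
  intro correct user _
  unfold Spec_generate_html_word generate_html_word generate_html_word_alt
  rw [pvLoop1A_eq]
  simp
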